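-- pv_equiv track=rewrite | github.com/pkmnabcd/physics_lab_tech | data analysis/MERRA-2 data analysis/multi_dataset_graphing.py | get_index_from_tuple
-- ===== SOURCE A (Python) =====
-- def get_index_from_tuple(tup_list):
--     """
--     Takes a list of tuples, and decides if the lon difference number is the changing one, or if the lat number is the
--     changing one.
--     :param: tup_list: List of tuples like this: [(0,0),(3,1),(4352,892)]
--     :return: 0 if lon is the changing value, 1 if lat is the changing value
--     """
--     return_0 = False
--     return_1 = True
--     vals_0 = []
--     vals_1 = []
--     for tup in tup_list:
--         vals_0.append(tup[0])
--         vals_1.append(tup[1])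
--     for i in range(1, len(tup_list)):
--         if vals_0[i-1] == vals_0[i]:
--             return_0 = False
--             return_1 = True
--         elif vals_1[i-1] == vals_1[i]:
--             return_0 = True
--             return_1 = False
--     if return_0:
--         return 0
--     if return_1:
--         return 1
-- ===== SOURCE B (Python) =====
-- def get_index_from_tuple(tup_list):
--     """
--     Takes a list of tuples, and decides if the lon difference number is the changing one, or if the lat number is the
--     changing one.
--     :param: tup_list: List of tuples like this: [(0,0),(3,1),(4352,892)]
--     :return: 0 if lon is the changing value, 1 if lat is the changing value
--     """
--     # The answer is decided by the LAST adjacent pair that matches (lon equality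
--     # taking priority over lat equality), so scan from the back and return at the
--     # first deciding pair; default is 1.
--     for i in range(len(tup_list) - 1, 0, -1):
--         if tup_list[i - 1][0] == tup_list[i][0]:
--             return 1
--         if tup_list[i - 1][1] == tup_list[i][1]:
--             return 0
--     return 1
-- ===== Notes on version B (the rewrite author's own statement) =====
-- stated objective: simpler
-- what changed: Replaces the two intermediate value lists and the pair of last-wins boolean flags by a single backward scan over adjacent pairs that returns at the first (i.e. Python A's last) deciding pair, defaulting to 1.
import Mathlib
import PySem

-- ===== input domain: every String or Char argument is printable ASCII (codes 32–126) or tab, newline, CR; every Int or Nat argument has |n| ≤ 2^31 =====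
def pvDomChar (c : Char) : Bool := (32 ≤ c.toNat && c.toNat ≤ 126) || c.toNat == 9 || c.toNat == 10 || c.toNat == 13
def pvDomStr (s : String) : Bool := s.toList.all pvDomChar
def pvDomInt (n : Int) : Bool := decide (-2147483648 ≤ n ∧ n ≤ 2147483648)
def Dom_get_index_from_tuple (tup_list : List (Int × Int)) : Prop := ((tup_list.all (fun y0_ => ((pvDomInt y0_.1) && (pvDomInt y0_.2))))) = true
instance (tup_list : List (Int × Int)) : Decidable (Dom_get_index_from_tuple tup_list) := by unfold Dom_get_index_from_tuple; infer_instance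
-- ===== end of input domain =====

-- B replaces A's two intermediate lists and last-wins boolean flags by a single
-- backward scan over adjacent pairs with early return (objective: simpler).

-- ===== PORT A =====
-- literal transliteration of A: build vals_0/vals_1 by appending, then a forward
-- index loop updating the (return_0, return_1) flag pair, then read the flags.
-- The indices i-1, i are always in range, so pyGetD's default is never used.
def get_index_from_tuple (tup_list : List (Int × Int)) : Int :=
  let vals_0 : List Int := tup_list.foldl (fun acc tup => acc ++ [tup.1]) []
  let vals_1 : List Int := tup_list.foldl (fun acc tup => acc ++ [tup.2]) []
  let fl := (PySem.List.pyRange 1 (tup_list.length : Int) 1).foldl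
    (fun (fl : Bool × Bool) i =>
      if PySem.List.pyGetD vals_0 (i - 1) 0 = PySem.List.pyGetD vals_0 i 0 then (false, true)
      else if PySem.List.pyGetD vals_1 (i - 1) 0 = PySem.List.pyGetD vals_1 i 0 then (true, false)
      else fl)
    (false, true)
  -- Python: 'if return_0: return 0' then 'if return_1: return 1'; the flags are
  -- always complementary, so the final 0 branch is unreachable.
  if fl.1 then 0 else if fl.2 then 1 else 0

-- ===== PORT B =====
-- Source B's loop 'for i in range(len(tup_list)-1, 0, -1)' as structural recursion
-- on the loop counter i; indices are always in range so getD's default is unused.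
def pvAltGo (tl : List (Int × Int)) : Nat → Int
  | 0 => 1
  | i + 1 =>
    if (tl.getD i (0, 0)).1 = (tl.getD (i + 1) (0, 0)).1 then 1
    else if (tl.getD i (0, 0)).2 = (tl.getD (i + 1) (0, 0)).2 then 0
    else pvAltGo tl i

def get_index_from_tuple_alt (tup_list : List (Int × Int)) : Int :=
  pvAltGo tup_list (tup_list.length - 1)

-- ===== PRECONDITION & SPEC =====
def Spec_get_index_from_tuple (tup_list : List (Int × Int)) (out : Int) : Prop := out = get_index_from_tuple_alt tup_list
instance (tup_list : List (Int × Int)) (out : Int) : Decidable (Spec_get_index_from_tuple tup_list out) := by unfold Spec_get_index_from_tuple; infer_instance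

-- ===== CLAIM (what is proved, stated in full; the proofs are below) =====
def Claim_equal_get_index_from_tuple : Prop := ∀ (tup_list : List (Int × Int)), Dom_get_index_from_tuple tup_list → Spec_get_index_from_tuple tup_list (get_index_from_tuple tup_list)

-- ===== LEMMAS AND PROOFS =====

-- A's loop body, with the value lists already rewritten to maps
def pvStep (tl : List (Int × Int)) (fl : Bool × Bool) (i : Int) : Bool × Bool :=
  if PySem.List.pyGetD (tl.map Prod.fst) (i - 1) 0 = PySem.List.pyGetD (tl.map Prod.fst) i 0 then (false, true)
  else if PySem.List.pyGetD (tl.map Prod.snd) (i - 1) 0 = PySem.List.pyGetD (tl.map Prod.snd) i 0 then (true, false)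
  else fl

-- A's final flag read
def pvOut (fl : Bool × Bool) : Int := if fl.1 then 0 else if fl.2 then 1 else 0

lemma pvGetD_map_fst (tl : List (Int × Int)) (k : Nat) :
    (tl.map Prod.fst).getD k 0 = (tl.getD k (0, 0)).1 := by
  simp [List.getD_eq_getElem?_getD, List.getElem?_map]
  cases tl[k]? <;> rfl

lemma pvGetD_map_snd (tl : List (Int × Int)) (k : Nat) :
    (tl.map Prod.snd).getD k 0 = (tl.getD k (0, 0)).2 := by
  simp [List.getD_eq_getElem?_getD, List.getElem?_map]
  cases tl[k]? <;> rfl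

-- main invariant: A's flag fold over range(1, k+1) read out equals B's backward scan from k
lemma pvMain (tl : List (Int × Int)) (k : Nat) :
    pvOut (((PySem.List.pyRange 1 ((k : Int) + 1) 1)).foldl (pvStep tl) (false, true)) = pvAltGo tl k := by
  induction k with
  | zero =>
    simp [pvOut, pvAltGo]
  | succ k ih =>
    have h : PySem.List.pyRange 1 (((k + 1 : Nat) : Int) + 1) 1
        = PySem.List.pyRange 1 ((k : Int) + 1) 1 ++ [(k : Int) + 1] := by
      have := PySem.List.pyRange_one_succ_right (a := 1) (b := (k : Int) + 1) (by omega)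
      push_cast
      convert this using 2
    rw [h, List.foldl_append]
    show pvOut (pvStep tl _ ((k : Int) + 1)) = pvAltGo tl (k + 1)
    have e1 : ((k : Int) + 1 - 1) = ((k : Nat) : Int) := by omega
    have e2 : ((k : Int) + 1) = (((k + 1 : Nat) : Int)) := by push_cast; ring
    rw [pvStep, e1, e2, PySem.List.pyGetD_natCast, PySem.List.pyGetD_natCast,
      PySem.List.pyGetD_natCast, PySem.List.pyGetD_natCast,
      pvGetD_map_fst, pvGetD_map_fst, pvGetD_map_snd, pvGetD_map_snd]
    rw [pvAltGo]
    split_ifs with h1 h2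
    · rfl
    · rfl
    · exact ih

-- ===== VERDICT (by name: the statement is the Claim_ definition above) =====
theorem get_index_from_tuple_spec : Claim_equal_get_index_from_tuple := by
  intro tl _
  unfold Spec_get_index_from_tuple get_index_from_tuple get_index_from_tuple_alt
  simp only [PySem.List.foldl_append_singleton_eq_map, List.nil_append]
  cases tl with
  | nil => simp [pvAltGo]
  | cons x xs =>
    have hlen : ((x :: xs).length : Int) = ((xs.length : Nat) : Int) + 1 := by
      simp [List.length_cons]
    rw [hlen]
    have := pvMain (x :: xs) xs.length
    simp only [List.length_cons, Nat.add_sub_cancel]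
    exact this
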